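-- pv_equiv track=rewrite | github.com/aysbukre/TermProject303 | main.py | apply_vowel_swaps
-- ===== SOURCE A (Python) =====
-- from itertools import product
--
-- def apply_vowel_swaps(word):
--     # Return flat option list of all possible variations of the word by swapping vowels.
--     vowels = "aeiou"
--     word = list(word)
--     for i, l in enumerate(word):
--         if type(l) == list:
--             pass
--         elif l in vowels:
--             word[i] = list(vowels)
--
--     for p in product(*word):
--         yield ''.join(p)
-- ===== SOURCE B (Python) =====
-- def apply_vowel_swaps(word):
--     # Build the result list back-to-front: fold over the characters from the
--     # right, keeping the list of all variation suffixes seen so far.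
--     vowels = "aeiou"
--     results = ['']
--     for ch in reversed(word):
--         opts = vowels if ch in vowels else ch
--         results = [o + r for o in opts for r in results]
--     yield from results
-- ===== Notes on version B (the rewrite author's own statement) =====
-- stated objective: alternative
-- what changed: Replaces the options-list construction plus itertools.product with a single right-to-left fold that maintains the list of all variation suffixes, prepending each option of the current character.
import Mathlib
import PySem

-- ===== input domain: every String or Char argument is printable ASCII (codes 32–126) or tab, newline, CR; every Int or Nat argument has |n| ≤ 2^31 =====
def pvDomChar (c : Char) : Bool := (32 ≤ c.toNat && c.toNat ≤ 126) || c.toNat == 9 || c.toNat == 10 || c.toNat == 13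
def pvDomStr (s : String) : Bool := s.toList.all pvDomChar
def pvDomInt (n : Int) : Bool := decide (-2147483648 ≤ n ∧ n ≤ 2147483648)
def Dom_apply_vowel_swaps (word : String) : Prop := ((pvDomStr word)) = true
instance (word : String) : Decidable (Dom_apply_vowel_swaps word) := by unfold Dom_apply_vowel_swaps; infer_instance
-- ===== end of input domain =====

-- B replaces the options-list + itertools.product pipeline of A with a single
-- right-to-left fold over the characters that maintains the list of all
-- variation suffixes (same cost; different decomposition).


-- ===== PORT A =====
-- itertools.product(*word): for c in first: for t in product(rest): yield (c, t…)
def pvProduct : List (List Char) → List (List Char)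
  | [] => [[]]
  | o :: rest => o.flatMap (fun c => (pvProduct rest).map (fun t => c :: t))

def apply_vowel_swaps (word : String) : List String :=
  let vowels : List Char := "aeiou".toList
  -- the enumerate loop: each position becomes either list(vowels) or the char itself
  let w : List (List Char) := word.toList.map (fun l => if l ∈ vowels then vowels else [l])
  (pvProduct w).map (fun p => String.ofList p)   -- ''.join(p)

-- ===== PORT B =====
def apply_vowel_swaps_alt (word : String) : List String :=
  word.toList.foldr
    (fun ch results =>
      (if ch ∈ "aeiou".toList then "aeiou".toList else [ch]).flatMap
        (fun o => results.map (fun r => String.ofList (o :: r.toList))))   -- o + r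
    [""]

-- ===== PRECONDITION & SPEC =====
def Spec_apply_vowel_swaps (word : String) (out : List String) : Prop := out = apply_vowel_swaps_alt word
instance (word : String) (out : List String) : Decidable (Spec_apply_vowel_swaps word out) := by unfold Spec_apply_vowel_swaps; infer_instance

-- ===== CLAIM (what is proved, stated in full; the proofs are below) =====
def Claim_equal_apply_vowel_swaps : Prop := ∀ (word : String), Dom_apply_vowel_swaps word → Spec_apply_vowel_swaps word (apply_vowel_swaps word)

-- ===== LEMMAS AND PROOFS =====
theorem pvCore (l : List Char) :
    (pvProduct (l.map (fun c => if c ∈ "aeiou".toList then "aeiou".toList else [c]))).map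
        (fun p => String.ofList p)
      = l.foldr
          (fun ch results =>
            (if ch ∈ "aeiou".toList then "aeiou".toList else [ch]).flatMap
              (fun o => results.map (fun r => String.ofList (o :: r.toList))))
          [""] := by
  induction l with
  | nil => rfl
  | cons c rest ih =>
    simp only [List.map_cons, List.foldr_cons, pvProduct, ← ih,
      List.map_flatMap, List.map_map]
    congr 1
    funext o
    congr 1
    funext t
    simp

-- ===== VERDICT (by name: the statement is the Claim_ definition above) =====
theorem apply_vowel_swaps_spec : Claim_equal_apply_vowel_swaps := by
  intro word _
  show _ = _
  simpa [apply_vowel_swaps, apply_vowel_swaps_alt] using pvCore word.toList
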